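-- pv_equiv track=rewrite | github.com/Ulatec/radar-dsp | scripts/generate_mf_test_vectors.py | matched_filter_fixed
-- ===== SOURCE A (Python) =====
-- def matched_filter_fixed(rx_i, rx_q, chirp_i, chirp_q):
--     """
--     Run the matched filter in fixed-point, matching the VHDL implementation.
--
--     Uses the same time-multiplexed algorithm:
--       - Shift buffer
--       - MAC over all taps with complex multiply
--       - Output the accumulator (top 32 bits of 48-bit result)
--
--     Coefficients are the reversed, conjugated chirp (same as mf_coef_pkg.vhd).
--     """
--     num_taps = len(chirp_i)
--
--     # Build coefficients: reversed, conjugated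
--     coef_i = list(reversed(chirp_i))
--     coef_q = [-q for q in reversed(chirp_q)]
--
--     # Sample buffer (shift register), initialized to zeros
--     buf_i = [0] * num_taps
--     buf_q = [0] * num_taps
--
--     out_i = []
--     out_q = []
--
--     for n in range(len(rx_i)):
--         # Shift buffer, new sample at position 0
--         for k in range(num_taps - 1, 0, -1):
--             buf_i[k] = buf_i[k - 1]
--             buf_q[k] = buf_q[k - 1]
--         buf_i[0] = rx_i[n]
--         buf_q[0] = rx_q[n]
--
--         # MAC: complex multiply-accumulate over all taps
--         accum_real = 0
--         accum_imag = 0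
--         for k in range(num_taps):
--             # (a + jb)(c + jd) = (ac - bd) + j(ad + bc)
--             accum_real += buf_i[k] * coef_i[k] - buf_q[k] * coef_q[k]
--             accum_imag += buf_i[k] * coef_q[k] + buf_q[k] * coef_i[k]
--
--         # Truncate to top 32 bits of 48-bit accumulator
--         # The accumulator is a signed 48-bit value.
--         # Taking bits 47 downto 16 is equivalent to right-shifting by 16.
--         accum_real_trunc = accum_real >> 16
--         accum_imag_trunc = accum_imag >> 16
--
--         # Clamp to 32-bit signed range
--         max32 = (1 << 31) - 1
--         min32 = -(1 << 31)
--         accum_real_trunc = max(min32, min(max32, accum_real_trunc))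
--         accum_imag_trunc = max(min32, min(max32, accum_imag_trunc))
--
--         out_i.append(accum_real_trunc)
--         out_q.append(accum_imag_trunc)
--
--     return out_i, out_q
-- ===== SOURCE B (Python) =====
-- def matched_filter_fixed(rx_i, rx_q, chirp_i, chirp_q):
--     """Scatter-style fixed-point matched filter: each input sample adds its
--     products directly into output accumulators (no shift register), then one
--     pass truncates (>>16) and clamps to the signed 32-bit range."""
--     n = len(rx_i)
--     m = len(chirp_i)
--     coef_i = chirp_i[::-1]
--     coef_q = [-q for q in chirp_q[::-1]]
--     acc_r = [0] * n
--     acc_j = [0] * n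
--     for j in range(n):
--         xr = rx_i[j]
--         xq = rx_q[j]
--         for s in range(min(m, n - j)):
--             ci = coef_i[s]
--             cq = coef_q[s]
--             acc_r[j + s] += xr * ci - xq * cq
--             acc_j[j + s] += xr * cq + xq * ci
--     max32 = (1 << 31) - 1
--     min32 = -(1 << 31)
--     out_i = [max(min32, min(max32, v >> 16)) for v in acc_r]
--     out_q = [max(min32, min(max32, v >> 16)) for v in acc_j]
--     return out_i, out_q
-- ===== Notes on version B (the rewrite author's own statement) =====
-- stated objective: alternative
-- what changed: Replaced the VHDL-style shift-register + per-output MAC over all taps with a scatter convolution: each input sample adds its complex products directly into output accumulator arrays (skipping the zero-padded startup taps), followed by a single truncate-and-clamp pass.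
import Mathlib
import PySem

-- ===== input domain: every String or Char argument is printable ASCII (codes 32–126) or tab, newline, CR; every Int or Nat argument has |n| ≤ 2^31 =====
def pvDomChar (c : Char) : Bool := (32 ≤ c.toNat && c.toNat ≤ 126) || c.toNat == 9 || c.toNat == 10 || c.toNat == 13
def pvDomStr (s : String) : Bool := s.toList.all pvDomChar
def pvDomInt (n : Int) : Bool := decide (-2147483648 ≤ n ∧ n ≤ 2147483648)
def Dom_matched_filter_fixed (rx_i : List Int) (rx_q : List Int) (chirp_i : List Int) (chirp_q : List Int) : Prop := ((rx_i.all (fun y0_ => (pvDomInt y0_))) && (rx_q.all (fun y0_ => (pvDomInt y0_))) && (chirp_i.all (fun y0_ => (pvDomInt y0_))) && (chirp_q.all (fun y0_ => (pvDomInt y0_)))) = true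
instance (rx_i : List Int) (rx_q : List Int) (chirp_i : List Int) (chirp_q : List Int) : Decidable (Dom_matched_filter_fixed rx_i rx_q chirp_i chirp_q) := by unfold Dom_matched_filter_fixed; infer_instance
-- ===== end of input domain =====

-- B replaces A's shift-register + per-output MAC with a scatter convolution (each input sample adds
-- its products into output accumulators, then one truncate-and-clamp pass); equivalence proved on Pre_.

-- ===== PORT A =====
-- A's inner shift loop body: for k in range(num_taps-1, 0, -1): buf[k] = buf[k-1]  (both buffers)
def mfShiftStep (b : List Int × List Int) (k : Int) : List Int × List Int :=
  (b.1.set k.toNat (b.1.getD (k.toNat - 1) 0), b.2.set k.toNat (b.2.getD (k.toNat - 1) 0))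

-- A's loop body for one sample n: shift buffers, insert sample, MAC over all taps, truncate+clamp, append
def mfStepA (rx_i rx_q coef_i coef_q : List Int) (num_taps : Nat)
    (st : (List Int × List Int) × List Int × List Int) (n : Nat) :
    (List Int × List Int) × List Int × List Int :=
  let shifted := (PySem.List.pyRange ((num_taps : Int) - 1) 0 (-1)).foldl mfShiftStep st.1
  let bi := shifted.1.set 0 (rx_i.getD n 0)
  let bq := shifted.2.set 0 (rx_q.getD n 0)
  let acc := (List.range num_taps).foldl (fun (a : Int × Int) k =>
    (a.1 + bi.getD k 0 * coef_i.getD k 0 - bq.getD k 0 * coef_q.getD k 0,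
     a.2 + bi.getD k 0 * coef_q.getD k 0 + bq.getD k 0 * coef_i.getD k 0)) (0, 0)
  ((bi, bq),
   st.2.1 ++ [max (-((1 : Int) <<< 31)) (min (((1 : Int) <<< 31) - 1) (acc.1 >>> 16))],
   st.2.2 ++ [max (-((1 : Int) <<< 31)) (min (((1 : Int) <<< 31) - 1) (acc.2 >>> 16))])

def matched_filter_fixed (rx_i : List Int) (rx_q : List Int) (chirp_i : List Int) (chirp_q : List Int) : List Int × List Int :=
  let num_taps := chirp_i.length
  let coef_i := chirp_i.reverse
  let coef_q := chirp_q.reverse.map (fun q => -q)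
  let res := (List.range rx_i.length).foldl (mfStepA rx_i rx_q coef_i coef_q num_taps)
      ((List.replicate num_taps 0, List.replicate num_taps 0), ([], []))
  res.2

-- ===== PORT B =====
-- B's inner loop body: sample j scatters its complex product with tap s into accumulator slot j+s
def mfScatter (xr xq : Int) (coef_i coef_q : List Int) (j : Nat)
    (acc : List Int × List Int) (s : Nat) : List Int × List Int :=
  (acc.1.set (j + s) (acc.1.getD (j + s) 0 + xr * coef_i.getD s 0 - xq * coef_q.getD s 0),
   acc.2.set (j + s) (acc.2.getD (j + s) 0 + xr * coef_q.getD s 0 + xq * coef_i.getD s 0))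

-- B's outer loop body: scatter sample j over taps s in range(min(m, n - j))
def mfStepB (rx_i rx_q coef_i coef_q : List Int) (n m : Nat)
    (acc : List Int × List Int) (j : Nat) : List Int × List Int :=
  (List.range (min m (n - j))).foldl (mfScatter (rx_i.getD j 0) (rx_q.getD j 0) coef_i coef_q j) acc

def matched_filter_fixed_alt (rx_i : List Int) (rx_q : List Int) (chirp_i : List Int) (chirp_q : List Int) : List Int × List Int :=
  let n := rx_i.length
  let m := chirp_i.length
  let coef_i := chirp_i.reverse
  let coef_q := chirp_q.reverse.map (fun q => -q)
  let acc := (List.range n).foldl (mfStepB rx_i rx_q coef_i coef_q n m)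
      (List.replicate n 0, List.replicate n 0)
  (acc.1.map (fun (v : Int) => max (-((1 : Int) <<< 31)) (min (((1 : Int) <<< 31) - 1) (v >>> 16))),
   acc.2.map (fun (v : Int) => max (-((1 : Int) <<< 31)) (min (((1 : Int) <<< 31) - 1) (v >>> 16))))

-- ===== PRECONDITION & SPEC =====
-- Pre_ excludes exactly the inputs on which Python A raises IndexError: a nonempty rx_i with an
-- empty chirp_i (buf_i[0] on an empty buffer), or rx_q shorter than rx_i, or chirp_q shorter than chirp_i.
def Pre_matched_filter_fixed (rx_i : List Int) (rx_q : List Int) (chirp_i : List Int) (chirp_q : List Int) : Prop :=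
  rx_i ≠ [] → (chirp_i ≠ [] ∧ rx_i.length ≤ rx_q.length ∧ chirp_i.length ≤ chirp_q.length)
instance (rx_i : List Int) (rx_q : List Int) (chirp_i : List Int) (chirp_q : List Int) : Decidable (Pre_matched_filter_fixed rx_i rx_q chirp_i chirp_q) := by unfold Pre_matched_filter_fixed; infer_instance

def pvWitness_matched_filter_fixed : List Int × List Int × List Int × List Int := ([1, 2], [0, 1], [3], [-1])

def Spec_matched_filter_fixed (rx_i : List Int) (rx_q : List Int) (chirp_i : List Int) (chirp_q : List Int) (out : List Int × List Int) : Prop := out = matched_filter_fixed_alt rx_i rx_q chirp_i chirp_q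
instance (rx_i : List Int) (rx_q : List Int) (chirp_i : List Int) (chirp_q : List Int) (out : List Int × List Int) : Decidable (Spec_matched_filter_fixed rx_i rx_q chirp_i chirp_q out) := by unfold Spec_matched_filter_fixed; infer_instance

-- ===== CLAIM (what is proved, stated in full; the proofs are below) =====
def Claim_equal_matched_filter_fixed : Prop := ∀ (rx_i : List Int) (rx_q : List Int) (chirp_i : List Int) (chirp_q : List Int), Dom_matched_filter_fixed rx_i rx_q chirp_i chirp_q → Pre_matched_filter_fixed rx_i rx_q chirp_i chirp_q → Spec_matched_filter_fixed rx_i rx_q chirp_i chirp_q (matched_filter_fixed rx_i rx_q chirp_i chirp_q)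

-- ===== LEMMAS AND PROOFS =====

-- common closed form both ports are reduced to
def mfClamp (v : Int) : Int := max (-((1 : Int) <<< 31)) (min (((1 : Int) <<< 31) - 1) (v >>> 16))

-- sample value feeding tap k of output t (0 during the startup transient)
def mfG (xs : List Int) (t k : Nat) : Int := if k ≤ t then xs.getD (t - k) 0 else 0

def mfSr (rx_i rx_q ci cq : List Int) (m t : Nat) : Int :=
  ((List.range m).map (fun k => mfG rx_i t k * ci.getD k 0 - mfG rx_q t k * cq.getD k 0)).sum
def mfSi (rx_i rx_q ci cq : List Int) (m t : Nat) : Int :=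
  ((List.range m).map (fun k => mfG rx_i t k * cq.getD k 0 + mfG rx_q t k * ci.getD k 0)).sum

-- A's shift register after c samples of xs
def mfBuf (xs : List Int) (c m : Nat) : List Int :=
  (List.range m).map (fun k => if k < c then xs.getD (c - 1 - k) 0 else 0)

-- B's accumulator value for slot t after c outer iterations
def mfPr (rx_i rx_q ci cq : List Int) (n m t c : Nat) : Int :=
  ((List.range c).map (fun j => if j ≤ t ∧ t < j + min m (n - j) then
      rx_i.getD j 0 * ci.getD (t - j) 0 - rx_q.getD j 0 * cq.getD (t - j) 0 else 0)).sum
def mfPq (rx_i rx_q ci cq : List Int) (n m t c : Nat) : Int :=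
  ((List.range c).map (fun j => if j ≤ t ∧ t < j + min m (n - j) then
      rx_i.getD j 0 * cq.getD (t - j) 0 + rx_q.getD j 0 * ci.getD (t - j) 0 else 0)).sum

lemma mf_getD_set (l : List Int) (k j : Nat) (v : Int) :
    (l.set k v).getD j 0 = if k = j ∧ k < l.length then v else l.getD j 0 := by
  by_cases hj : k = j
  · subst hj
    by_cases hk : k < l.length
    · simp [List.getD_eq_getElem?_getD, List.getElem?_set, hk]
    · simp [List.getD_eq_getElem?_getD, hk]
  · simp [List.getD_eq_getElem?_getD, hj]

lemma mf_getD_map_range (m : Nat) (f : Nat → Int) (i : Nat) :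
    ((List.range m).map f).getD i 0 = if i < m then f i else 0 := by
  by_cases h : i < m
  · rw [if_pos h, PySem.List.getD_map_range _ _ _ _ h]
  · rw [if_neg h]
    simp [List.getD_eq_getElem?_getD,
      List.getElem?_eq_none (by simp; omega : ((List.range m).map f).length ≤ i)]

lemma mf_sum_bridge (c : Nat) (f : Nat → Int) :
    ((List.range c).map f).sum = Finset.sum (Finset.range c) f := by
  simp [Finset.range, Multiset.range]

lemma mf_ext_getD (l1 l2 : List Int) (hl : l1.length = l2.length)
    (h : ∀ i, l1.getD i 0 = l2.getD i 0) : l1 = l2 := by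
  apply List.ext_getElem hl
  intro i hi1 hi2
  have := h i
  rwa [List.getD_eq_getElem l1 0 hi1, List.getD_eq_getElem l2 0 hi2] at this

lemma mf_pyRange_desc (a : Int) :
    PySem.List.pyRange a 0 (-1) = (List.range a.toNat).map (fun k : Nat => a - (k : Int)) := by
  by_cases h : (0:Int) < a
  · simp [PySem.List.pyRange, h]
    intro k _
    ring
  · rw [Int.toNat_of_nonpos (by omega)]
    simp [PySem.List.pyRange, h]

lemma mf_bufD (xs : List Int) (c m i : Nat) :
    (mfBuf xs c m).getD i 0 = if i < m ∧ i < c then xs.getD (c - 1 - i) 0 else 0 := by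
  unfold mfBuf
  rw [mf_getD_map_range]
  split_ifs <;> first | rfl | omega

lemma mf_mac_fold (l : List Nat) (f g : Nat → Int) (a b : Int) :
    l.foldl (fun (p : Int × Int) k => (p.1 + f k, p.2 + g k)) (a, b) =
      (a + (l.map f).sum, b + (l.map g).sum) := by
  induction l generalizing a b with
  | nil => simp
  | cons x xs ih => simp [ih, add_assoc]

lemma mf_shift_aux (a : Nat) : ∀ (b1 b2 : List Int), a < b1.length → a < b2.length →
    ((((List.range a).map (fun k : Nat => ((a : Int) - (k : Int)))).foldl mfShiftStep (b1, b2)).1.length = b1.length) ∧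
    ((((List.range a).map (fun k : Nat => ((a : Int) - (k : Int)))).foldl mfShiftStep (b1, b2)).2.length = b2.length) ∧
    (∀ i, (((List.range a).map (fun k : Nat => ((a : Int) - (k : Int)))).foldl mfShiftStep (b1, b2)).1.getD i 0 =
      if 1 ≤ i ∧ i ≤ a then b1.getD (i - 1) 0 else b1.getD i 0) ∧
    (∀ i, (((List.range a).map (fun k : Nat => ((a : Int) - (k : Int)))).foldl mfShiftStep (b1, b2)).2.getD i 0 =
      if 1 ≤ i ∧ i ≤ a then b2.getD (i - 1) 0 else b2.getD i 0) := by
  induction a with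
  | zero =>
    intro b1 b2 _ _
    refine ⟨rfl, rfl, fun i => ?_, fun i => ?_⟩ <;>
      · rw [if_neg (by omega)]
        rfl
  | succ a ih =>
    intro b1 b2 h1 h2
    have hlist : (List.range (a+1)).map (fun k : Nat => (((a+1 : Nat) : Int) - (k : Int))) =
        (((a+1 : Nat) : Int)) :: (List.range a).map (fun k : Nat => ((a : Int) - (k : Int))) := by
      rw [List.range_succ_eq_map]
      simp only [List.map_cons, List.map_map, Nat.cast_zero]
      congr 1
      · simp
    rw [hlist]
    simp only [List.foldl_cons]
    have hstep : mfShiftStep (b1, b2) ((a+1 : Nat) : Int) =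
        (b1.set (a+1) (b1.getD a 0), b2.set (a+1) (b2.getD a 0)) := by
      simp [mfShiftStep]
    rw [hstep]
    obtain ⟨l1, l2, g1, g2⟩ := ih (b1.set (a+1) (b1.getD a 0)) (b2.set (a+1) (b2.getD a 0))
      (by simp only [List.length_set]; omega) (by simp only [List.length_set]; omega)
    refine ⟨by rw [l1, List.length_set], by rw [l2, List.length_set], ?_, ?_⟩
    · intro i
      rw [g1 i]
      by_cases hi : 1 ≤ i ∧ i ≤ a
      · rw [if_pos hi, if_pos (show 1 ≤ i ∧ i ≤ a + 1 by omega), mf_getD_set,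
            if_neg (show ¬(a + 1 = i - 1 ∧ a + 1 < b1.length) by omega)]
      · rcases eq_or_ne i (a+1) with rfl | hia
        · rw [if_neg hi, mf_getD_set, if_pos ⟨rfl, h1⟩,
              if_pos (show 1 ≤ a + 1 ∧ a + 1 ≤ a + 1 by omega)]
          norm_num
        · rw [if_neg hi, mf_getD_set, if_neg (show ¬(a + 1 = i ∧ a + 1 < b1.length) by omega),
              if_neg (show ¬(1 ≤ i ∧ i ≤ a + 1) by omega)]
    · intro i
      rw [g2 i]
      by_cases hi : 1 ≤ i ∧ i ≤ a
      · rw [if_pos hi, if_pos (show 1 ≤ i ∧ i ≤ a + 1 by omega), mf_getD_set,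
            if_neg (show ¬(a + 1 = i - 1 ∧ a + 1 < b2.length) by omega)]
      · rcases eq_or_ne i (a+1) with rfl | hia
        · rw [if_neg hi, mf_getD_set, if_pos ⟨rfl, h2⟩,
              if_pos (show 1 ≤ a + 1 ∧ a + 1 ≤ a + 1 by omega)]
          norm_num
        · rw [if_neg hi, mf_getD_set, if_neg (show ¬(a + 1 = i ∧ a + 1 < b2.length) by omega),
              if_neg (show ¬(1 ≤ i ∧ i ≤ a + 1) by omega)]

lemma mf_stepA_eq (rx_i rx_q ci cq : List Int) (m c : Nat) (o1 o2 : List Int) :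
    mfStepA rx_i rx_q ci cq m ((mfBuf rx_i c m, mfBuf rx_q c m), (o1, o2)) c =
    ((mfBuf rx_i (c + 1) m, mfBuf rx_q (c + 1) m),
     (o1 ++ [mfClamp (mfSr rx_i rx_q ci cq m c)], o2 ++ [mfClamp (mfSi rx_i rx_q ci cq m c)])) := by
  by_cases hm : m = 0
  · subst hm
    simp [mfStepA, mfBuf, mfSr, mfSi, mfClamp]
  · have hm1 : 0 < m := by omega
    have hlen1 : (mfBuf rx_i c m).length = m := by simp [mfBuf]
    have hlen2 : (mfBuf rx_q c m).length = m := by simp [mfBuf]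
    have hL : PySem.List.pyRange ((m : Int) - 1) 0 (-1) =
        (List.range (m-1)).map (fun k : Nat => (((m-1 : Nat) : Int)) - (k : Int)) := by
      rw [mf_pyRange_desc]
      have ht : ((m : Int) - 1).toNat = m - 1 := by omega
      rw [ht]
      apply List.map_congr_left
      intro k _
      have hcast : ((m - 1 : Nat) : Int) = (m : Int) - 1 := by omega
      rw [hcast]
    simp only [mfStepA]
    rw [hL]
    obtain ⟨sl1, sl2, sg1, sg2⟩ := mf_shift_aux (m-1) (mfBuf rx_i c m) (mfBuf rx_q c m)
      (by rw [hlen1]; omega) (by rw [hlen2]; omega)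
    have hbi : ((((List.range (m-1)).map (fun k : Nat => (((m-1 : Nat) : Int)) - (k : Int))).foldl
        mfShiftStep (mfBuf rx_i c m, mfBuf rx_q c m)).1.set 0 (rx_i.getD c 0)) = mfBuf rx_i (c+1) m := by
      apply mf_ext_getD
      · rw [List.length_set, sl1, hlen1]; simp [mfBuf]
      · intro i
        rw [mf_getD_set, sl1, hlen1, sg1 i]
        simp only [mf_bufD]
        split_ifs <;> first | rfl | omega | (congr 1; omega)
    have hbq : ((((List.range (m-1)).map (fun k : Nat => (((m-1 : Nat) : Int)) - (k : Int))).foldl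
        mfShiftStep (mfBuf rx_i c m, mfBuf rx_q c m)).2.set 0 (rx_q.getD c 0)) = mfBuf rx_q (c+1) m := by
      apply mf_ext_getD
      · rw [List.length_set, sl2, hlen2]; simp [mfBuf]
      · intro i
        rw [mf_getD_set, sl2, hlen2, sg2 i]
        simp only [mf_bufD]
        split_ifs <;> first | rfl | omega | (congr 1; omega)
    rw [hbi, hbq]
    have hfun : (fun (a : Int × Int) k =>
        (a.1 + (mfBuf rx_i (c+1) m).getD k 0 * ci.getD k 0 - (mfBuf rx_q (c+1) m).getD k 0 * cq.getD k 0,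
         a.2 + (mfBuf rx_i (c+1) m).getD k 0 * cq.getD k 0 + (mfBuf rx_q (c+1) m).getD k 0 * ci.getD k 0)) =
        (fun (a : Int × Int) k =>
        (a.1 + ((mfBuf rx_i (c+1) m).getD k 0 * ci.getD k 0 - (mfBuf rx_q (c+1) m).getD k 0 * cq.getD k 0),
         a.2 + ((mfBuf rx_i (c+1) m).getD k 0 * cq.getD k 0 + (mfBuf rx_q (c+1) m).getD k 0 * ci.getD k 0))) := by
      funext p k
      simp only [Prod.mk.injEq]
      constructor <;> ring
    rw [hfun, mf_mac_fold]
    have hsr : ((List.range m).map (fun k => (mfBuf rx_i (c+1) m).getD k 0 * ci.getD k 0 -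
        (mfBuf rx_q (c+1) m).getD k 0 * cq.getD k 0)).sum = mfSr rx_i rx_q ci cq m c := by
      unfold mfSr
      apply congrArg List.sum
      apply List.map_congr_left
      intro k hk
      simp only [List.mem_range] at hk
      simp only [mf_bufD, mfG]
      split_ifs <;> first | rfl | omega
    have hsi : ((List.range m).map (fun k => (mfBuf rx_i (c+1) m).getD k 0 * cq.getD k 0 +
        (mfBuf rx_q (c+1) m).getD k 0 * ci.getD k 0)).sum = mfSi rx_i rx_q ci cq m c := by
      unfold mfSi
      apply congrArg List.sum
      apply List.map_congr_left
      intro k hk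
      simp only [List.mem_range] at hk
      simp only [mf_bufD, mfG]
      split_ifs <;> first | rfl | omega
    rw [hsr, hsi]
    simp [mfClamp]

lemma mf_A_loop (rx_i rx_q ci cq : List Int) (m c : Nat) :
    (List.range c).foldl (mfStepA rx_i rx_q ci cq m)
        ((List.replicate m 0, List.replicate m 0), ([], [])) =
    ((mfBuf rx_i c m, mfBuf rx_q c m),
     ((List.range c).map (fun t => mfClamp (mfSr rx_i rx_q ci cq m t)),
      (List.range c).map (fun t => mfClamp (mfSi rx_i rx_q ci cq m t)))) := by
  induction c with
  | zero => simp [mfBuf, List.map_const']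
  | succ c ih =>
    rw [List.range_succ, List.foldl_append, ih]
    simp only [List.foldl_cons, List.foldl_nil]
    rw [mf_stepA_eq]
    simp

lemma mf_scatter_fold (j L : Nat) (xr xq : Int) (ci cq a1 a2 : List Int)
    (h1 : j + L ≤ a1.length) (h2 : j + L ≤ a2.length) :
    (((List.range L).foldl (mfScatter xr xq ci cq j) (a1, a2)).1.length = a1.length) ∧
    (((List.range L).foldl (mfScatter xr xq ci cq j) (a1, a2)).2.length = a2.length) ∧
    (∀ t, ((List.range L).foldl (mfScatter xr xq ci cq j) (a1, a2)).1.getD t 0 =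
      a1.getD t 0 + (if j ≤ t ∧ t < j + L then xr * ci.getD (t - j) 0 - xq * cq.getD (t - j) 0 else 0)) ∧
    (∀ t, ((List.range L).foldl (mfScatter xr xq ci cq j) (a1, a2)).2.getD t 0 =
      a2.getD t 0 + (if j ≤ t ∧ t < j + L then xr * cq.getD (t - j) 0 + xq * ci.getD (t - j) 0 else 0)) := by
  induction L with
  | zero =>
    refine ⟨rfl, rfl, fun t => ?_, fun t => ?_⟩ <;>
      · rw [if_neg (by omega), add_zero]
        rfl
  | succ L ih =>
    obtain ⟨l1, l2, g1, g2⟩ := ih (by omega) (by omega)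
    rw [List.range_succ]
    simp only [List.foldl_append, List.foldl_cons, List.foldl_nil]
    refine ⟨?_, ?_, ?_, ?_⟩
    · simp [mfScatter, l1]
    · simp [mfScatter, l2]
    · intro t
      simp only [mfScatter]
      rw [mf_getD_set, l1]
      rcases eq_or_ne (j + L) t with he | hne
      · subst he
        rw [if_pos ⟨rfl, by omega⟩, g1 (j + L), if_neg (by omega), if_pos (by omega),
           show j + L - j = L from by omega]
        ring
      · rw [if_neg (fun hc => hne hc.1), g1 t]
        by_cases hcnd : j ≤ t ∧ t < j + L
        · rw [if_pos hcnd, if_pos (by omega)]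
        · rw [if_neg hcnd, if_neg (by omega)]
    · intro t
      simp only [mfScatter]
      rw [mf_getD_set, l2]
      rcases eq_or_ne (j + L) t with he | hne
      · subst he
        rw [if_pos ⟨rfl, by omega⟩, g2 (j + L), if_neg (by omega), if_pos (by omega),
           show j + L - j = L from by omega]
        ring
      · rw [if_neg (fun hc => hne hc.1), g2 t]
        by_cases hcnd : j ≤ t ∧ t < j + L
        · rw [if_pos hcnd, if_pos (by omega)]
        · rw [if_neg hcnd, if_neg (by omega)]

lemma mf_Pr_succ (rx_i rx_q ci cq : List Int) (n m t c : Nat) :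
    mfPr rx_i rx_q ci cq n m t (c+1) = mfPr rx_i rx_q ci cq n m t c +
      (if c ≤ t ∧ t < c + min m (n - c) then
        rx_i.getD c 0 * ci.getD (t - c) 0 - rx_q.getD c 0 * cq.getD (t - c) 0 else 0) := by
  unfold mfPr
  rw [List.range_succ]
  simp

lemma mf_Pq_succ (rx_i rx_q ci cq : List Int) (n m t c : Nat) :
    mfPq rx_i rx_q ci cq n m t (c+1) = mfPq rx_i rx_q ci cq n m t c +
      (if c ≤ t ∧ t < c + min m (n - c) then
        rx_i.getD c 0 * cq.getD (t - c) 0 + rx_q.getD c 0 * ci.getD (t - c) 0 else 0) := by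
  unfold mfPq
  rw [List.range_succ]
  simp

lemma mf_B_loop (rx_i rx_q ci cq : List Int) (n m c : Nat) (hc : c ≤ n) :
    (List.range c).foldl (mfStepB rx_i rx_q ci cq n m) (List.replicate n 0, List.replicate n 0) =
    ((List.range n).map (fun t => mfPr rx_i rx_q ci cq n m t c),
     (List.range n).map (fun t => mfPq rx_i rx_q ci cq n m t c)) := by
  induction c with
  | zero => simp [mfPr, mfPq, List.map_const']
  | succ c ih =>
    rw [List.range_succ, List.foldl_append, ih (by omega)]
    simp only [List.foldl_cons, List.foldl_nil]
    unfold mfStepB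
    obtain ⟨l1, l2, g1, g2⟩ := mf_scatter_fold c (min m (n - c)) (rx_i.getD c 0) (rx_q.getD c 0) ci cq
      ((List.range n).map (fun t => mfPr rx_i rx_q ci cq n m t c))
      ((List.range n).map (fun t => mfPq rx_i rx_q ci cq n m t c))
      (by simp only [List.length_map, List.length_range]; omega)
      (by simp only [List.length_map, List.length_range]; omega)
    refine Prod.ext ?_ ?_
    · apply mf_ext_getD
      · rw [l1]; simp
      · intro t
        rw [g1 t, mf_getD_map_range, mf_getD_map_range]
        by_cases htn : t < n
        · rw [if_pos htn, if_pos htn, mf_Pr_succ]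
        · rw [if_neg htn, if_neg htn, if_neg (by omega)]
          norm_num
    · apply mf_ext_getD
      · rw [l2]; simp
      · intro t
        rw [g2 t, mf_getD_map_range, mf_getD_map_range]
        by_cases htn : t < n
        · rw [if_pos htn, if_pos htn, mf_Pq_succ]
        · rw [if_neg htn, if_neg htn, if_neg (by omega)]
          norm_num

lemma mf_sum_reindex (n m t : Nat) (ht : t < n) (F : Nat → Int) :
    ((List.range n).map (fun j => if j ≤ t ∧ t < j + min m (n - j) then F (t - j) else 0)).sum
    = ((List.range m).map (fun k => if k ≤ t then F k else 0)).sum := by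
  rw [mf_sum_bridge, mf_sum_bridge]
  rw [Finset.sum_congr rfl (fun j hj => by
    simp only [Finset.mem_range] at hj
    show (if j ≤ t ∧ t < j + min m (n - j) then F (t - j) else 0) =
      (if j ≤ t ∧ t - j < m then F (t - j) else 0)
    by_cases hc : j ≤ t ∧ t - j < m
    · rw [if_pos (by omega), if_pos hc]
    · rw [if_neg (by omega), if_neg hc])]
  rw [show (Finset.sum (Finset.range n) fun j => if j ≤ t ∧ t - j < m then F (t - j) else 0)
      = Finset.sum (Finset.range (t+1)) (fun j => if j ≤ t ∧ t - j < m then F (t - j) else 0) by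
    symm
    apply Finset.sum_subset (by intro x hx; simp only [Finset.mem_range] at hx ⊢; omega)
    intro j _ hj
    simp only [Finset.mem_range] at hj
    rw [if_neg (by omega)]]
  rw [← Finset.sum_range_reflect]
  rw [Finset.sum_congr rfl (fun k hk => by
    simp only [Finset.mem_range] at hk
    show (if (t+1-1-k) ≤ t ∧ t - (t+1-1-k) < m then F (t - (t+1-1-k)) else 0)
      = (if k < m then F k else 0)
    have e1 : t + 1 - 1 - k = t - k := by omega
    have e2 : t - (t - k) = k := by omega
    rw [e1, e2]
    by_cases hc : k < m
    · rw [if_pos (by omega), if_pos hc]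
    · rw [if_neg (by omega), if_neg hc])]
  rw [show (Finset.sum (Finset.range (t+1)) fun k => if k < m then F k else 0)
      = Finset.sum (Finset.range (min (t+1) m)) F by
    rw [← Finset.sum_subset (by intro x hx; simp only [Finset.mem_range] at hx ⊢; omega :
        Finset.range (min (t+1) m) ⊆ Finset.range (t+1))
      (fun k hk1 hk2 => by
        simp only [Finset.mem_range] at hk1 hk2
        rw [if_neg (by omega)])]
    apply Finset.sum_congr rfl
    intro k hk
    simp only [Finset.mem_range] at hk
    rw [if_pos (by omega)]]
  rw [show (Finset.sum (Finset.range m) fun k => if k ≤ t then F k else 0)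
      = Finset.sum (Finset.range (min (t+1) m)) F by
    rw [← Finset.sum_subset (by intro x hx; simp only [Finset.mem_range] at hx ⊢; omega :
        Finset.range (min (t+1) m) ⊆ Finset.range m)
      (fun k hk1 hk2 => by
        simp only [Finset.mem_range] at hk1 hk2
        rw [if_neg (by omega)])]
    apply Finset.sum_congr rfl
    intro k hk
    simp only [Finset.mem_range] at hk
    rw [if_pos (by omega)]]

lemma mf_Pr_eq_Sr (rx_i rx_q ci cq : List Int) (n m t : Nat) (ht : t < n) :
    mfPr rx_i rx_q ci cq n m t n = mfSr rx_i rx_q ci cq m t := by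
  unfold mfPr mfSr
  rw [List.map_congr_left (fun j hj => by
    simp only [List.mem_range] at hj
    show (if j ≤ t ∧ t < j + min m (n - j) then
        rx_i.getD j 0 * ci.getD (t - j) 0 - rx_q.getD j 0 * cq.getD (t - j) 0 else 0) =
      (if j ≤ t ∧ t < j + min m (n - j) then
        (fun k => rx_i.getD (t - k) 0 * ci.getD k 0 - rx_q.getD (t - k) 0 * cq.getD k 0) (t - j) else 0)
    by_cases hc : j ≤ t ∧ t < j + min m (n - j)
    · rw [if_pos hc, if_pos hc]
      simp only
      rw [show t - (t - j) = j from by omega]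
    · rw [if_neg hc, if_neg hc])]
  rw [mf_sum_reindex n m t ht (fun k => rx_i.getD (t - k) 0 * ci.getD k 0 - rx_q.getD (t - k) 0 * cq.getD k 0)]
  apply congrArg List.sum
  apply List.map_congr_left
  intro k hk
  simp only [mfG]
  by_cases hkt : k ≤ t
  · rw [if_pos hkt, if_pos hkt, if_pos hkt]
  · rw [if_neg hkt, if_neg hkt, if_neg hkt]
    ring

lemma mf_Pq_eq_Si (rx_i rx_q ci cq : List Int) (n m t : Nat) (ht : t < n) :
    mfPq rx_i rx_q ci cq n m t n = mfSi rx_i rx_q ci cq m t := by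
  unfold mfPq mfSi
  rw [List.map_congr_left (fun j hj => by
    simp only [List.mem_range] at hj
    show (if j ≤ t ∧ t < j + min m (n - j) then
        rx_i.getD j 0 * cq.getD (t - j) 0 + rx_q.getD j 0 * ci.getD (t - j) 0 else 0) =
      (if j ≤ t ∧ t < j + min m (n - j) then
        (fun k => rx_i.getD (t - k) 0 * cq.getD k 0 + rx_q.getD (t - k) 0 * ci.getD k 0) (t - j) else 0)
    by_cases hc : j ≤ t ∧ t < j + min m (n - j)
    · rw [if_pos hc, if_pos hc]
      simp only
      rw [show t - (t - j) = j from by omega]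
    · rw [if_neg hc, if_neg hc])]
  rw [mf_sum_reindex n m t ht (fun k => rx_i.getD (t - k) 0 * cq.getD k 0 + rx_q.getD (t - k) 0 * ci.getD k 0)]
  apply congrArg List.sum
  apply List.map_congr_left
  intro k hk
  simp only [mfG]
  by_cases hkt : k ≤ t
  · rw [if_pos hkt, if_pos hkt, if_pos hkt]
  · rw [if_neg hkt, if_neg hkt, if_neg hkt]
    ring

lemma mf_A_eq (rx_i rx_q chirp_i chirp_q : List Int) :
    matched_filter_fixed rx_i rx_q chirp_i chirp_q =
    ((List.range rx_i.length).map (fun t => mfClamp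
        (mfSr rx_i rx_q chirp_i.reverse (chirp_q.reverse.map (fun q => -q)) chirp_i.length t)),
     (List.range rx_i.length).map (fun t => mfClamp
        (mfSi rx_i rx_q chirp_i.reverse (chirp_q.reverse.map (fun q => -q)) chirp_i.length t))) := by
  simp only [matched_filter_fixed]
  rw [mf_A_loop]

lemma mf_B_eq (rx_i rx_q chirp_i chirp_q : List Int) :
    matched_filter_fixed_alt rx_i rx_q chirp_i chirp_q =
    ((List.range rx_i.length).map (fun t => mfClamp
        (mfSr rx_i rx_q chirp_i.reverse (chirp_q.reverse.map (fun q => -q)) chirp_i.length t)),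
     (List.range rx_i.length).map (fun t => mfClamp
        (mfSi rx_i rx_q chirp_i.reverse (chirp_q.reverse.map (fun q => -q)) chirp_i.length t))) := by
  simp only [matched_filter_fixed_alt]
  rw [mf_B_loop _ _ _ _ _ _ _ (le_refl rx_i.length)]
  dsimp only
  refine Prod.ext ?_ ?_
  · dsimp only
    rw [List.map_map]
    apply List.map_congr_left
    intro t htm
    simp only [List.mem_range] at htm
    simp only [Function.comp_apply, mfClamp]
    rw [mf_Pr_eq_Sr _ _ _ _ _ _ _ htm]
  · dsimp only
    rw [List.map_map]
    apply List.map_congr_left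
    intro t htm
    simp only [List.mem_range] at htm
    simp only [Function.comp_apply, mfClamp]
    rw [mf_Pq_eq_Si _ _ _ _ _ _ _ htm]

-- ===== VERDICT (by name: the statement is the Claim_ definition above) =====
theorem matched_filter_fixed_spec : Claim_equal_matched_filter_fixed := by
  intro rx_i rx_q chirp_i chirp_q _ _
  unfold Spec_matched_filter_fixed
  rw [mf_A_eq, mf_B_eq]
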